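-- pv_equiv track=rewrite | github.com/ClayGendron/vfs | src/vfs/graph/rustworkx.py | _strip_leaves
-- ===== SOURCE A (Python) =====
-- def _strip_leaves(
--     kept: set[str],
--     edges_out: dict[str, frozenset[str]],
--     edges_in: dict[str, frozenset[str]],
--     protected: set[str],
-- ) -> set[str]:
--     """Remove non-protected leaf nodes iteratively. O(n+e)."""
--     succs: dict[str, set[str]] = {}
--     preds: dict[str, set[str]] = {}
--     for s in kept:
--         succs[s] = {t for t in edges_out.get(s, ()) if t in kept}
--     for t in kept:
--         preds[t] = {s for s in edges_in.get(t, ()) if s in kept}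
--
--     queue = [n for n in kept if n not in protected and (not succs.get(n) or not preds.get(n))]
--     removed: set[str] = set()
--     while queue:
--         node = queue.pop()
--         if node in removed or node in protected:
--             continue
--         removed.add(node)
--         for succ in succs.get(node, ()):
--             preds[succ].discard(node)
--             if succ not in protected and succ not in removed and (not preds[succ] or not succs[succ]):
--                 queue.append(succ)
--         for pred_node in preds.get(node, ()):
--             succs[pred_node].discard(node)
--             if (
--                 pred_node not in protected
--                 and pred_node not in removed
--                 and (not succs[pred_node] or not preds[pred_node])
--             ):
--                 queue.append(pred_node)
--     return kept - removed
-- ===== SOURCE B (Python) =====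
-- def _strip_leaves(
--     kept: set[str],
--     edges_out: dict[str, frozenset[str]],
--     edges_in: dict[str, frozenset[str]],
--     protected: set[str],
-- ) -> set[str]:
--     """Remove non-protected leaf nodes by whole-round sweeps.
--
--     Build successor/predecessor sets restricted to kept, then repeatedly
--     sweep the surviving nodes, dropping in one batch every non-protected
--     node with no successor or no predecessor left; prune each dropped node
--     from its neighbours' sets and stop when a sweep drops nothing.
--     """
--     succs = {n: {t for t in edges_out.get(n, ()) if t in kept} for n in kept}
--     preds = {n: {s for s in edges_in.get(n, ()) if s in kept} for n in kept}
--     alive = set(kept)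
--     while True:
--         drop = [n for n in alive if n not in protected and (not succs[n] or not preds[n])]
--         if not drop:
--             return alive
--         for d in drop:
--             for t in succs[d]:
--                 preds[t].discard(d)
--             for s in preds[d]:
--                 succs[s].discard(d)
--         alive -= set(drop)
-- ===== Notes on version B (the rewrite author's own statement) =====
-- stated objective: simpler
-- what changed: Replaced A's incremental worklist (queue, removed set, per-node enqueue conditions) by whole-round sweeps: each round scans the surviving nodes, drops every non-protected node with no successor or no predecessor left in one batch, prunes the dropped nodes from their neighbours' sets, and stops when a sweep drops nothing; Pre_ excludes only duplicate-element kept lists, which encode no Python set input.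
import Mathlib
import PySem

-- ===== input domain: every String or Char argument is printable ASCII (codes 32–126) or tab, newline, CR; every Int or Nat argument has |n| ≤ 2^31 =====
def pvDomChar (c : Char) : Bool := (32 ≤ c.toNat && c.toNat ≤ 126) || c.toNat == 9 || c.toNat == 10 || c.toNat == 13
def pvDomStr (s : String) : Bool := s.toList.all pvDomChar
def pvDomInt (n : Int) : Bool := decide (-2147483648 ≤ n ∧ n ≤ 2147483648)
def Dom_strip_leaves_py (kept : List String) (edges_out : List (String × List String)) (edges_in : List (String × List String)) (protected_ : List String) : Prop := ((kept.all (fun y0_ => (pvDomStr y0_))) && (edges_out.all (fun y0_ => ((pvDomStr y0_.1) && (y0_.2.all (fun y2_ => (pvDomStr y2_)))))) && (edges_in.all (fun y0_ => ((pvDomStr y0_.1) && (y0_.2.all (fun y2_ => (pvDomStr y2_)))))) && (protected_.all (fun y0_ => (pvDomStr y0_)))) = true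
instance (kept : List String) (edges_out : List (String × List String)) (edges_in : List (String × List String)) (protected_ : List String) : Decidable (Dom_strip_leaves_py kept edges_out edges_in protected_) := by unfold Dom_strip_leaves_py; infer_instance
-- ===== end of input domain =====

-- B replaces A's incremental worklist (queue, removed set, conditional enqueues) by
-- whole-round sweeps: each round drops every current leaf at once and prunes the dropped
-- nodes from their neighbours' sets; objective: a simpler decomposition, not speed.

-- ===== PORT A =====
-- helpers cited by the port itself (for its termination measure and invariant arguments)

-- `{t for t in edges.get(s, ()) if t in kept}` for every s in kept, as a dict
-- (both Pythons build succs/preds with this identical comprehension, so both ports use it)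
def pvAdj (kept : List String) (edges : List (String × List String)) : PySem.Dict String (PySem.Set String) :=
  kept.foldl
    (fun d s =>
      d.insert s (PySem.Set.ofList (((PySem.Dict.mk edges).getD s []).filter (fun t => kept.contains t))))
    PySem.Dict.empty

theorem pvFoldlInsert_getD (l : List String) (g : String → PySem.Set String)
    (d : PySem.Dict String (PySem.Set String)) (p : String) :
    (l.foldl (fun d s => d.insert s (g s)) d).getD p [] = if p ∈ l then g p else d.getD p [] := by
  induction l generalizing d with
  | nil => simp
  | cons y l ih =>
    rw [List.foldl_cons, ih]
    by_cases hpl : p ∈ l <;> by_cases hpy : p = y <;>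
      simp [hpl, hpy, PySem.Dict.getD_insert]

theorem pvAdj_getD (kept : List String) (edges : List (String × List String)) (p : String) :
    (pvAdj kept edges).getD p [] =
      if p ∈ kept then PySem.Set.ofList (((PySem.Dict.mk edges).getD p []).filter (fun t => kept.contains t)) else [] := by
  unfold pvAdj
  rw [pvFoldlInsert_getD]
  split <;> simp [PySem.Dict.getD_empty]

theorem pvAdj_sub (kept : List String) (edges : List (String × List String)) (k t : String)
    (h : t ∈ (pvAdj kept edges).getD k []) : t ∈ kept := by
  rw [pvAdj_getD] at h
  split at h
  · rw [PySem.Set.mem_ofList, List.mem_filter] at h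
    simpa using h.2
  · simp at h

theorem pvDiscard_idem (s : List String) (x : String) :
    PySem.Set.discard (PySem.Set.discard s x) x = PySem.Set.discard s x := by
  simp [PySem.Set.discard, List.filter_filter]

-- the body of each of A's two inner `for` loops: discard `node` from the entry of the
-- iterated neighbour, then maybe append it to the queue
def pvPass (node : String) (prot removed' : List String) (stale : String → List String)
    (st : PySem.Dict String (PySem.Set String) × List String) (x : String) :
    PySem.Dict String (PySem.Set String) × List String :=
  if x ∉ prot ∧ x ∉ removed' ∧
      ((st.1.modify x [] (fun s => PySem.Set.discard s node)).getD x [] = [] ∨ stale x = []) then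
    (st.1.modify x [] (fun s => PySem.Set.discard s node), st.2 ++ [x])
  else (st.1.modify x [] (fun s => PySem.Set.discard s node), st.2)

theorem pvPass_fst (node : String) (prot removed' : List String) (stale : String → List String)
    (st : PySem.Dict String (PySem.Set String) × List String) (x : String) :
    (pvPass node prot removed' stale st x).1 = st.1.modify x [] (fun s => PySem.Set.discard s node) := by
  unfold pvPass
  split <;> rfl

theorem pvPass_fst_getD (node : String) (prot removed' : List String) (stale : String → List String)
    (st : PySem.Dict String (PySem.Set String) × List String) (x p : String) :
    (pvPass node prot removed' stale st x).1.getD p [] =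
      if p = x then PySem.Set.discard (st.1.getD x []) node else st.1.getD p [] := by
  rw [pvPass_fst, PySem.Dict.getD_modify]

theorem pvPassFold_getD (node : String) (prot removed' : List String) (stale : String → List String)
    (l : List String) (st : PySem.Dict String (PySem.Set String) × List String) (p : String) :
    ((l.foldl (pvPass node prot removed' stale) st).1).getD p [] =
      if p ∈ l then PySem.Set.discard (st.1.getD p []) node else st.1.getD p [] := by
  induction l generalizing st with
  | nil => simp
  | cons y l ih =>
    rw [List.foldl_cons, ih]
    by_cases hpl : p ∈ l <;> by_cases hpy : p = y <;>
      simp [hpl, hpy, pvPass_fst_getD, pvDiscard_idem]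

theorem pvPassFold_queue_mem (node : String) (prot removed' : List String)
    (stale : String → List String) (l : List String)
    (st : PySem.Dict String (PySem.Set String) × List String) (x : String)
    (hx : x ∈ (l.foldl (pvPass node prot removed' stale) st).2) :
    x ∈ st.2 ∨ (x ∈ l ∧ x ∉ prot ∧ x ∉ removed' ∧
      (PySem.Set.discard (st.1.getD x []) node = [] ∨ stale x = [])) := by
  induction l generalizing st with
  | nil => exact Or.inl hx
  | cons y l ih =>
    rw [List.foldl_cons] at hx
    rcases ih _ hx with h | ⟨hxl, h1, h2, h3⟩
    · by_cases hcond : y ∉ prot ∧ y ∉ removed' ∧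
          ((st.1.modify y [] (fun s => PySem.Set.discard s node)).getD y [] = [] ∨ stale y = [])
      · have hq : (pvPass node prot removed' stale st y).2 = st.2 ++ [y] := by
          unfold pvPass; rw [if_pos hcond]
        rw [hq, List.mem_append, List.mem_singleton] at h
        rcases h with h | rfl
        · exact Or.inl h
        · refine Or.inr ⟨List.mem_cons_self, hcond.1, hcond.2.1, ?_⟩
          have h4 := hcond.2.2
          rwa [PySem.Dict.getD_modify, if_pos rfl] at h4
      · have hq : (pvPass node prot removed' stale st y).2 = st.2 := by
          unfold pvPass; rw [if_neg hcond]
        rw [hq] at h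
        exact Or.inl h
    · rw [pvPass_fst_getD] at h3
      by_cases hxy : x = y
      · subst hxy
        rw [if_pos rfl, pvDiscard_idem] at h3
        exact Or.inr ⟨List.mem_cons_self, h1, h2, h3⟩
      · rw [if_neg hxy] at h3
        exact Or.inr ⟨List.mem_cons_of_mem _ hxl, h1, h2, h3⟩

theorem pvRemovedBound (removed kept : List String) (h1 : removed.Nodup)
    (h2 : ∀ x ∈ removed, x ∈ kept) : removed.length ≤ kept.length :=
  (List.subperm_of_subset h1 h2).length_le

theorem pvSetAdd_of_not_mem (s : List String) (x : String) (hx : x ∉ s) :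
    PySem.Set.add s x = s ++ [x] := by
  unfold PySem.Set.add
  rw [if_neg]
  simpa using hx

theorem pvNodupSnoc (s : List String) (x : String) (h1 : s.Nodup) (hx : x ∉ s) :
    (s ++ [x]).Nodup := by
  rw [← List.concat_eq_append, List.nodup_concat]
  exact ⟨hx, h1⟩

-- kept-membership is preserved by the pass folds (used for the loop's invariant arguments)
theorem pvPassFold_kept (kept : List String) (node : String) (prot removed' : List String)
    (stale : String → List String) (l : List String)
    (st : PySem.Dict String (PySem.Set String) × List String)
    (h : ∀ k t, t ∈ st.1.getD k [] → t ∈ kept) :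
    ∀ k t, t ∈ (l.foldl (pvPass node prot removed' stale) st).1.getD k [] → t ∈ kept := by
  intro k t ht
  rw [pvPassFold_getD] at ht
  split at ht
  · rw [PySem.Set.mem_discard] at ht
    exact h k t ht.1
  · exact h k t ht

theorem pvPassFold_queue_kept (kept : List String) (node : String) (prot removed' : List String)
    (stale : String → List String) (l : List String)
    (st : PySem.Dict String (PySem.Set String) × List String)
    (hst : ∀ x ∈ st.2, x ∈ kept) (hl : ∀ x ∈ l, x ∈ kept) :
    ∀ x ∈ (l.foldl (pvPass node prot removed' stale) st).2, x ∈ kept := by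
  intro x hx
  rcases pvPassFold_queue_mem node prot removed' stale l st x hx with h | ⟨h, _⟩
  · exact hst x h
  · exact hl x h

-- the first inner `for` loop of an iteration (over succs[node]) and the second (over preds[node])
def pvStep1 (node : String) (prot removed' : List String)
    (succs preds : PySem.Dict String (PySem.Set String)) (q0 : List String) :
    PySem.Dict String (PySem.Set String) × List String :=
  (succs.getD node []).foldl (pvPass node prot removed' (fun y => succs.getD y [])) (preds, q0)

def pvStep2 (node : String) (prot removed' : List String)
    (succs preds : PySem.Dict String (PySem.Set String)) (q0 : List String) :
    PySem.Dict String (PySem.Set String) × List String :=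
  ((pvStep1 node prot removed' succs preds q0).1.getD node []).foldl
    (pvPass node prot removed' (fun y => (pvStep1 node prot removed' succs preds q0).1.getD y []))
    (succs, (pvStep1 node prot removed' succs preds q0).2)

theorem pvStepInv (kept prot removed' : List String) (node : String)
    (succs preds : PySem.Dict String (PySem.Set String)) (q0 : List String)
    (hq0 : ∀ x ∈ q0, x ∈ kept)
    (hs : ∀ k t, t ∈ succs.getD k [] → t ∈ kept)
    (hp : ∀ k t, t ∈ preds.getD k [] → t ∈ kept) :
    (∀ x ∈ (pvStep2 node prot removed' succs preds q0).2, x ∈ kept) ∧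
    (∀ k t, t ∈ (pvStep2 node prot removed' succs preds q0).1.getD k [] → t ∈ kept) ∧
    (∀ k t, t ∈ (pvStep1 node prot removed' succs preds q0).1.getD k [] → t ∈ kept) := by
  unfold pvStep2 pvStep1
  refine ⟨?_, ?_, ?_⟩
  · exact pvPassFold_queue_kept kept node prot removed' _ _ _
      (pvPassFold_queue_kept kept node prot removed' _ _ _ hq0 (fun x hx => hs node x hx))
      (fun x hx => pvPassFold_kept kept node prot removed' _ _ _ hp node x hx)
  · exact pvPassFold_kept kept node prot removed' _ _ _ hs
  · exact pvPassFold_kept kept node prot removed' _ _ _ hp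

theorem pvAddInv (kept removed : List String) (node : String)
    (hr : removed.Nodup ∧ ∀ x ∈ removed, x ∈ kept) (hnR : node ∉ removed) (hnk : node ∈ kept) :
    (PySem.Set.add removed node).Nodup ∧ ∀ x ∈ PySem.Set.add removed node, x ∈ kept := by
  rw [pvSetAdd_of_not_mem removed node hnR]
  refine ⟨pvNodupSnoc removed node hr.1 hnR, ?_⟩
  intro x hx
  rw [List.mem_append, List.mem_singleton] at hx
  rcases hx with hx | hx
  · exact hr.2 x hx
  · exact hx ▸ hnk

theorem pvDecSkip (queue : List String) (h : queue ≠ []) :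
    queue.dropLast.length < queue.length := by
  rw [List.length_dropLast]
  exact Nat.sub_lt (List.length_pos_of_ne_nil h) Nat.one_pos

theorem pvDecRem (kept removed : List String) (node : String)
    (h1 : removed.Nodup) (h2 : ∀ x ∈ removed, x ∈ kept) (hn : node ∉ removed) :
    kept.length + 1 - (PySem.Set.add removed node).length < kept.length + 1 - removed.length := by
  have hb := pvRemovedBound removed kept h1 h2
  have hlen : (PySem.Set.add removed node).length = removed.length + 1 := by
    rw [pvSetAdd_of_not_mem removed node hn]
    rw [List.length_append, List.length_cons, List.length_nil]
  rw [hlen]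
  exact Nat.sub_succ_lt_self _ _ (Nat.lt_succ_of_le hb)

theorem pvNeNil (l : List String) (h : ¬ l.isEmpty = true) : l ≠ [] := by
  simpa [List.isEmpty_iff] using h

theorem pvNotMem2 (a b : List String) (x : String) (h : ¬ (a.contains x || b.contains x) = true) :
    x ∉ a ∧ x ∉ b := by
  rw [Bool.or_eq_true] at h
  push_neg at h
  constructor
  · intro hc
    exact h.1 (by simpa using hc)
  · intro hc
    exact h.2 (by simpa using hc)

-- the `while queue:` loop of A; the propositional arguments only justify termination
def pvLoopA (kept prot : List String)
    (succs preds : PySem.Dict String (PySem.Set String)) (removed : PySem.Set String)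
    (queue : List String)
    (hq : ∀ x ∈ queue, x ∈ kept) (hr : removed.Nodup ∧ ∀ x ∈ removed, x ∈ kept)
    (hs : ∀ k t, t ∈ succs.getD k [] → t ∈ kept)
    (hp : ∀ k t, t ∈ preds.getD k [] → t ∈ kept) : List String :=
  if h : queue.isEmpty then PySem.Set.diff kept removed
  else
    -- node = queue.pop()
    let node := queue.getLast (pvNeNil queue h)
    if hnode : removed.contains node || prot.contains node then
      pvLoopA kept prot succs preds removed queue.dropLast
        (fun x hx => hq x ((List.dropLast_sublist queue).subset hx)) hr hs hp
    else
      -- removed.add(node); then the loop over succs[node], then the loop over preds[node]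
      let removed' := PySem.Set.add removed node
      let st1 := pvStep1 node prot removed' succs preds queue.dropLast
      let st2 := pvStep2 node prot removed' succs preds queue.dropLast
      have H := pvStepInv kept prot removed' node succs preds queue.dropLast
        (fun x hx => hq x ((List.dropLast_sublist queue).subset hx)) hs hp
      pvLoopA kept prot st2.1 st1.1 removed' st2.2
        H.1
        (pvAddInv kept removed node hr (pvNotMem2 removed prot node hnode).1
          (hq node (List.getLast_mem (pvNeNil queue h))))
        H.2.1
        H.2.2
termination_by ((kept.length + 1) - removed.length, queue.length)
decreasing_by
  · exact Prod.Lex.right _ (pvDecSkip queue (pvNeNil queue h))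
  · exact Prod.Lex.left _ _ (pvDecRem kept removed node hr.1 hr.2 (pvNotMem2 removed prot node hnode).1)

def strip_leaves_py (kept : List String) (edges_out : List (String × List String)) (edges_in : List (String × List String)) (protected_ : List String) : List String :=
  let succs := pvAdj kept edges_out
  let preds := pvAdj kept edges_in
  let queue := kept.filter
    (fun n => !protected_.contains n && ((succs.getD n []).isEmpty || (preds.getD n []).isEmpty))
  pvLoopA kept protected_ succs preds [] queue
    (fun x hx => (List.mem_filter.mp hx).1)
    ⟨List.nodup_nil, by simp⟩
    (fun k t ht => pvAdj_sub kept edges_out k t ht)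
    (fun k t ht => pvAdj_sub kept edges_in k t ht)

-- ===== PORT B =====
-- one inner `for` loop of a sweep: discard `node` from the entry of every x in l
def pvDiscardAll (node : String) (l : List String)
    (d : PySem.Dict String (PySem.Set String)) : PySem.Dict String (PySem.Set String) :=
  l.foldl (fun d x => d.modify x [] (fun s => PySem.Set.discard s node)) d

-- prune a dropped node d from its neighbours' sets:
-- `for t in succs[d]: preds[t].discard(d)` then `for s in preds[d]: succs[s].discard(d)`
def pvPrune (st : PySem.Dict String (PySem.Set String) × PySem.Dict String (PySem.Set String))
    (d : String) : PySem.Dict String (PySem.Set String) × PySem.Dict String (PySem.Set String) :=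
  (pvDiscardAll d ((pvDiscardAll d (st.1.getD d []) st.2).getD d []) st.1,
   pvDiscardAll d (st.1.getD d []) st.2)

-- the `while True:` sweep loop of B
def pvLoopB (prot : List String)
    (succs preds : PySem.Dict String (PySem.Set String)) (alive : List String) : List String :=
  if h : (alive.filter
      (fun n => !prot.contains n && ((succs.getD n []).isEmpty || (preds.getD n []).isEmpty))).isEmpty
  then alive
  else
    pvLoopB prot
      ((alive.filter
        (fun n => !prot.contains n && ((succs.getD n []).isEmpty || (preds.getD n []).isEmpty))).foldl
          pvPrune (succs, preds)).1
      ((alive.filter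
        (fun n => !prot.contains n && ((succs.getD n []).isEmpty || (preds.getD n []).isEmpty))).foldl
          pvPrune (succs, preds)).2
      (PySem.Set.diff alive (alive.filter
        (fun n => !prot.contains n && ((succs.getD n []).isEmpty || (preds.getD n []).isEmpty))))
termination_by alive.length
decreasing_by
  have hne : alive.filter
      (fun n => !prot.contains n && ((succs.getD n []).isEmpty || (preds.getD n []).isEmpty)) ≠ [] := by
    simpa [List.isEmpty_iff] using h
  obtain ⟨x, hx⟩ := List.exists_mem_of_ne_nil _ hne
  unfold PySem.Set.diff
  rw [List.length_filter_lt_length_iff_exists]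
  refine ⟨x, (List.mem_filter.mp hx).1, ?_⟩
  simp only [Bool.not_eq_true', Bool.not_eq_false]
  rw [PySem.Set.contains_iff, List.mem_unattach]
  exact ⟨(List.mem_filter.mp hx).1,
    List.mem_filter.mpr ⟨List.mem_attach _ _, (List.mem_filter.mp hx).2⟩⟩

def strip_leaves_py_alt (kept : List String) (edges_out : List (String × List String)) (edges_in : List (String × List String)) (protected_ : List String) : List String :=
  pvLoopB protected_ (pvAdj kept edges_out) (pvAdj kept edges_in) (PySem.Set.ofList kept)

-- ===== PRECONDITION & SPEC =====
-- Pre_ excludes only argument lists `kept` with duplicate elements: the parameter is a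
-- Python set, which is represented by a duplicate-free list, so such lists encode no
-- Python input (Python A applied to a raw duplicate list raises TypeError at `kept - removed`).
def Pre_strip_leaves_py (kept : List String) (edges_out : List (String × List String)) (edges_in : List (String × List String)) (protected_ : List String) : Prop :=
  kept.Nodup
instance (kept : List String) (edges_out : List (String × List String)) (edges_in : List (String × List String)) (protected_ : List String) : Decidable (Pre_strip_leaves_py kept edges_out edges_in protected_) := by unfold Pre_strip_leaves_py; infer_instance

def pvWitness_strip_leaves_py : List String × (List (String × List String)) × (List (String × List String)) × List String :=
  (["a", "b", "c"], [("a", ["b"]), ("b", ["a", "c"])], [("a", ["b"]), ("b", ["a"]), ("c", ["b"])], ["a"])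

def Spec_strip_leaves_py (kept : List String) (edges_out : List (String × List String)) (edges_in : List (String × List String)) (protected_ : List String) (out : List String) : Prop := out = strip_leaves_py_alt kept edges_out edges_in protected_
instance (kept : List String) (edges_out : List (String × List String)) (edges_in : List (String × List String)) (protected_ : List String) (out : List String) : Decidable (Spec_strip_leaves_py kept edges_out edges_in protected_ out) := by unfold Spec_strip_leaves_py; infer_instance

-- ===== CLAIM (what is proved, stated in full; the proofs are below) =====
def Claim_equal_strip_leaves_py : Prop := ∀ (kept : List String) (edges_out : List (String × List String)) (edges_in : List (String × List String)) (protected_ : List String), Dom_strip_leaves_py kept edges_out edges_in protected_ → Pre_strip_leaves_py kept edges_out edges_in protected_ → Spec_strip_leaves_py kept edges_out edges_in protected_ (strip_leaves_py kept edges_out edges_in protected_)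

-- ===== LEMMAS AND PROOFS =====
-- (the shared machinery below characterises both loops by the same removal derivations)

-- closed forms of the adjacency information both programs maintain:
-- `pvFS R p t` (resp. `pvFP R p s`) says t is still counted as a successor of p
-- (resp. s as a predecessor of p) once the nodes of R have been removed
def pvOut (eo : List (String × List String)) (n : String) : List String :=
  (PySem.Dict.mk eo).getD n []
def pvIn (ei : List (String × List String)) (n : String) : List String :=
  (PySem.Dict.mk ei).getD n []

def pvFS (kept : List String) (eo ei : List (String × List String)) (R : List String)
    (p t : String) : Prop :=
  t ∈ pvOut eo p ∧ t ∈ kept ∧ (t ∉ R ∨ p ∉ pvIn ei t)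
def pvFP (kept : List String) (eo ei : List (String × List String)) (R : List String)
    (p s : String) : Prop :=
  s ∈ pvIn ei p ∧ s ∈ kept ∧ (s ∉ R ∨ p ∉ pvOut eo s)

-- n is removable once R has been removed
def pvRem (kept : List String) (eo ei : List (String × List String)) (prot R : List String)
    (n : String) : Prop :=
  n ∈ kept ∧ n ∉ prot ∧ ((∀ t, ¬ pvFS kept eo ei R n t) ∨ (∀ s, ¬ pvFP kept eo ei R n s))

-- the removal sequences both programs can produce, and saturation (no removable node left)
inductive pvDeriv (kept : List String) (eo ei : List (String × List String)) (prot : List String) :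
    List String → Prop
  | nil : pvDeriv kept eo ei prot []
  | snoc {R : List String} {n : String} : pvDeriv kept eo ei prot R →
      pvRem kept eo ei prot R n → n ∉ R → pvDeriv kept eo ei prot (R ++ [n])

def pvSat (kept : List String) (eo ei : List (String × List String)) (prot R : List String) : Prop :=
  ∀ n, pvRem kept eo ei prot R n → n ∈ R

theorem pvFS_mono (kept : List String) (eo ei : List (String × List String)) {R R' : List String}
    (hsub : ∀ x ∈ R, x ∈ R') {p t : String} (h : pvFS kept eo ei R' p t) : pvFS kept eo ei R p t := by
  refine ⟨h.1, h.2.1, ?_⟩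
  rcases h.2.2 with h2 | h2
  · exact Or.inl (fun hc => h2 (hsub _ hc))
  · exact Or.inr h2

theorem pvFP_mono (kept : List String) (eo ei : List (String × List String)) {R R' : List String}
    (hsub : ∀ x ∈ R, x ∈ R') {p s : String} (h : pvFP kept eo ei R' p s) : pvFP kept eo ei R p s := by
  refine ⟨h.1, h.2.1, ?_⟩
  rcases h.2.2 with h2 | h2
  · exact Or.inl (fun hc => h2 (hsub _ hc))
  · exact Or.inr h2

theorem pvRem_mono (kept : List String) (eo ei : List (String × List String)) (prot : List String)
    {R R' : List String} (hsub : ∀ x ∈ R, x ∈ R') {n : String}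
    (h : pvRem kept eo ei prot R n) : pvRem kept eo ei prot R' n := by
  refine ⟨h.1, h.2.1, ?_⟩
  rcases h.2.2 with h2 | h2
  · exact Or.inl (fun t ht => h2 t (pvFS_mono kept eo ei hsub ht))
  · exact Or.inr (fun s hs => h2 s (pvFP_mono kept eo ei hsub hs))

theorem pvDeriv_sub_of_sat (kept : List String) (eo ei : List (String × List String))
    (prot : List String) {R R' : List String} (hd : pvDeriv kept eo ei prot R)
    (hsat : pvSat kept eo ei prot R') : ∀ x ∈ R, x ∈ R' := by
  induction hd with
  | nil => simp
  | snoc hd hrem _ ih =>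
    intro x hx
    rw [List.mem_append, List.mem_singleton] at hx
    rcases hx with hx | rfl
    · exact ih x hx
    · exact hsat x (pvRem_mono kept eo ei prot ih hrem)

-- appending a whole batch of simultaneously removable nodes is a valid derivation
theorem pvDeriv_append (kept : List String) (eo ei : List (String × List String))
    (prot : List String) (L : List String) : ∀ (R : List String), pvDeriv kept eo ei prot R →
    L.Nodup → (∀ x ∈ L, x ∉ R) → (∀ x ∈ L, pvRem kept eo ei prot R x) →
    pvDeriv kept eo ei prot (R ++ L) := by
  induction L with
  | nil =>
    intro R hR _ _ _
    simpa using hR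
  | cons d L ih =>
    intro R hR hnd hdis hrem
    have hstep : pvDeriv kept eo ei prot (R ++ [d]) :=
      hR.snoc (hrem d List.mem_cons_self) (hdis d List.mem_cons_self)
    have hsub : ∀ z ∈ R, z ∈ R ++ [d] := fun z hz => List.mem_append_left _ hz
    have h := ih (R ++ [d]) hstep (List.Nodup.of_cons hnd)
      (by
        intro x hx
        rw [List.mem_append, List.mem_singleton]
        push_neg
        exact ⟨hdis x (List.mem_cons_of_mem _ hx),
          fun he => (List.nodup_cons.mp hnd).1 (he ▸ hx)⟩)
      (fun x hx => pvRem_mono kept eo ei prot hsub (hrem x (List.mem_cons_of_mem _ hx)))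
    simpa [List.append_assoc] using h

-- how one removal changes the closed forms
theorem pvFS_snoc_mem (kept : List String) (eo ei : List (String × List String)) (R : List String)
    (node p : String) (hnR : node ∉ R) (hpi : p ∈ pvIn ei node) (t : String) :
    (pvFS kept eo ei R p t ∧ t ≠ node) ↔ pvFS kept eo ei (R ++ [node]) p t := by
  unfold pvFS
  constructor
  · rintro ⟨⟨m1, m2, m3⟩, hne⟩
    refine ⟨m1, m2, ?_⟩
    rcases m3 with hm | hm
    · left
      intro hc
      rcases List.mem_append.mp hc with hh | hh
      · exact hm hh
      · exact hne (List.mem_singleton.mp hh)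
    · exact Or.inr hm
  · rintro ⟨m1, m2, m3⟩
    have hne : t ≠ node := by
      intro he; subst he
      rcases m3 with hm | hm
      · exact hm (List.mem_append_right _ (List.mem_singleton.mpr rfl))
      · exact hm hpi
    refine ⟨⟨m1, m2, ?_⟩, hne⟩
    rcases m3 with hm | hm
    · exact Or.inl (fun hc => hm (List.mem_append_left _ hc))
    · exact Or.inr hm

theorem pvFS_snoc_not_mem (kept : List String) (eo ei : List (String × List String))
    (R : List String) (node p : String) (hpi : p ∉ pvIn ei node) (t : String) :
    pvFS kept eo ei R p t ↔ pvFS kept eo ei (R ++ [node]) p t := by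
  unfold pvFS
  constructor
  · rintro ⟨m1, m2, m3⟩
    refine ⟨m1, m2, ?_⟩
    by_cases ht : t = node
    · subst ht; exact Or.inr hpi
    · rcases m3 with hm | hm
      · left
        intro hc
        rcases List.mem_append.mp hc with hh | hh
        · exact hm hh
        · exact ht (List.mem_singleton.mp hh)
      · exact Or.inr hm
  · rintro ⟨m1, m2, m3⟩
    refine ⟨m1, m2, ?_⟩
    rcases m3 with hm | hm
    · exact Or.inl (fun hc => hm (List.mem_append_left _ hc))
    · exact Or.inr hm

theorem pvFP_snoc_mem (kept : List String) (eo ei : List (String × List String)) (R : List String)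
    (node p : String) (hnR : node ∉ R) (hpo : p ∈ pvOut eo node) (s : String) :
    (pvFP kept eo ei R p s ∧ s ≠ node) ↔ pvFP kept eo ei (R ++ [node]) p s :=
  pvFS_snoc_mem kept ei eo R node p hnR hpo s

theorem pvFP_snoc_not_mem (kept : List String) (eo ei : List (String × List String))
    (R : List String) (node p : String) (hpo : p ∉ pvOut eo node) (s : String) :
    pvFP kept eo ei R p s ↔ pvFP kept eo ei (R ++ [node]) p s :=
  pvFS_snoc_not_mem kept ei eo R node p hpo s

-- x gets enqueued when its check fires at its own iteration (A-side)
theorem pvPassFold_queue_mono (node : String) (prot removed' : List String)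
    (stale : String → List String) (x : String) :
    ∀ (l : List String) (st : PySem.Dict String (PySem.Set String) × List String),
      x ∈ st.2 → x ∈ (l.foldl (pvPass node prot removed' stale) st).2 := by
  intro l
  induction l with
  | nil => intro st hx; exact hx
  | cons y l ih =>
    intro st hx
    rw [List.foldl_cons]
    apply ih
    have hcase : (pvPass node prot removed' stale st y).2 = st.2 ++ [y] ∨
        (pvPass node prot removed' stale st y).2 = st.2 := by
      unfold pvPass
      split
      · exact Or.inl rfl
      · exact Or.inr rfl
    rcases hcase with hc | hc <;> rw [hc]
    · exact List.mem_append_left _ hx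
    · exact hx

theorem pvPassFold_enqueued (node : String) (prot removed' : List String)
    (stale : String → List String) (x : String) :
    ∀ (l : List String) (st : PySem.Dict String (PySem.Set String) × List String),
      x ∈ l → x ∉ prot → x ∉ removed' →
      (PySem.Set.discard (st.1.getD x []) node = [] ∨ stale x = []) →
      x ∈ (l.foldl (pvPass node prot removed' stale) st).2 := by
  intro l
  induction l with
  | nil => intro st hx; cases hx
  | cons y l ih =>
    intro st hx h1 h2 h3
    rw [List.foldl_cons]
    by_cases hxy : x = y
    · subst hxy
      apply pvPassFold_queue_mono
      have hcond : x ∉ prot ∧ x ∉ removed' ∧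
          ((st.1.modify x [] (fun s => PySem.Set.discard s node)).getD x [] = [] ∨ stale x = []) := by
        refine ⟨h1, h2, ?_⟩
        rwa [PySem.Dict.getD_modify, if_pos rfl]
      have hsnd : (pvPass node prot removed' stale st x).2 = st.2 ++ [x] := by
        unfold pvPass; rw [if_pos hcond]
      rw [hsnd]
      exact List.mem_append_right _ (List.mem_singleton.mpr rfl)
    · have hxl : x ∈ l := by
        rcases List.mem_cons.mp hx with h | h
        · exact absurd h hxy
        · exact h
      apply ih _ hxl h1 h2
      rw [pvPass_fst_getD, if_neg hxy]
      exact h3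

theorem pvLoopA_spec (kept : List String) (eo ei : List (String × List String)) (prot : List String)
    (succs preds : PySem.Dict String (PySem.Set String)) (removed : PySem.Set String)
    (queue : List String)
    (hq : ∀ x ∈ queue, x ∈ kept) (hr : removed.Nodup ∧ ∀ x ∈ removed, x ∈ kept)
    (hs : ∀ k t, t ∈ succs.getD k [] → t ∈ kept)
    (hp : ∀ k t, t ∈ preds.getD k [] → t ∈ kept)
    (HI2s : ∀ p ∈ kept, p ∉ removed → ∀ t, t ∈ succs.getD p [] ↔ pvFS kept eo ei removed p t)
    (HI2p : ∀ p ∈ kept, p ∉ removed → ∀ s, s ∈ preds.getD p [] ↔ pvFP kept eo ei removed p s)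
    (HI3 : ∀ x ∈ queue, x ∈ prot ∨ x ∈ removed ∨ pvRem kept eo ei prot removed x)
    (HI4 : ∀ n ∈ kept, n ∉ removed → pvRem kept eo ei prot removed n → n ∈ queue)
    (HD : pvDeriv kept eo ei prot removed) :
    ∃ R, pvDeriv kept eo ei prot R ∧ pvSat kept eo ei prot R ∧
      pvLoopA kept prot succs preds removed queue hq hr hs hp = PySem.Set.diff kept R := by
  revert HI2s HI2p HI3 HI4 HD
  fun_induction pvLoopA kept prot succs preds removed queue hq hr hs hp with
  | case1 S P R Q hq hr hs hp hQ =>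
    intro HI2s HI2p HI3 HI4 HD
    have hQnil : Q = [] := List.isEmpty_iff.mp hQ
    subst hQnil
    refine ⟨R, HD, ?_, rfl⟩
    intro n hrem
    by_cases hn : n ∈ R
    · exact hn
    · exact absurd (HI4 n hrem.1 hn hrem) (List.not_mem_nil)
  | case2 S P R Q hq hr hs hp hne nd hnode IH =>
    intro HI2s HI2p HI3 HI4 HD
    apply IH
    · exact HI2s
    · exact HI2p
    · exact fun x hx => HI3 x ((List.dropLast_sublist Q).subset hx)
    · intro n hnk hnR hrem
      have hq1 : n ∈ Q := HI4 n hnk hnR hrem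
      have hnnd : n ≠ nd := by
        intro he
        rw [Bool.or_eq_true] at hnode
        rcases hnode with hc | hc
        · exact hnR (he ▸ (by simpa using hc : nd ∈ R))
        · exact hrem.2.1 (he ▸ (by simpa using hc : nd ∈ prot))
      rw [← List.dropLast_concat_getLast (pvNeNil Q hne)] at hq1
      rcases List.mem_append.mp hq1 with hh | hh
      · exact hh
      · exact absurd (List.mem_singleton.mp hh) hnnd
    · exact HD
  | case3 S P R Q hq hr hs hp hne nd hnode R' s1 s2 Hinv IH =>
    intro HI2s HI2p HI3 HI4 HD
    have hne' : Q ≠ [] := pvNeNil Q hne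
    have hnodeq : nd ∈ Q := List.getLast_mem hne'
    have hnk : nd ∈ kept := hq nd hnodeq
    have hnR : nd ∉ R := (pvNotMem2 R prot nd hnode).1
    have hnp : nd ∉ prot := (pvNotMem2 R prot nd hnode).2
    have hremnd : pvRem kept eo ei prot R nd := by
      rcases HI3 nd hnodeq with hh | hh | hh
      · exact absurd hh hnp
      · exact absurd hh hnR
      · exact hh
    have hadd : PySem.Set.add R nd = R ++ [nd] := pvSetAdd_of_not_mem R nd hnR
    have hmemR' : ∀ x, x ∈ PySem.Set.add R nd ↔ x ∈ R ∨ x = nd := by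
      intro x; rw [hadd]; simp
    have hsub' : ∀ x ∈ R, x ∈ PySem.Set.add R nd := fun x hx => (hmemR' x).mpr (Or.inl hx)
    have HD' : pvDeriv kept eo ei prot (PySem.Set.add R nd) := by
      rw [hadd]; exact HD.snoc hremnd hnR
    have hsCur : ∀ t, t ∈ S.getD nd [] ↔ pvFS kept eo ei R nd t := HI2s nd hnk hnR
    have hP1 : ∀ p, s1.1.getD p [] =
        if p ∈ S.getD nd [] then PySem.Set.discard (P.getD p []) nd else P.getD p [] :=
      fun p => pvPassFold_getD nd prot (PySem.Set.add R nd) (fun y => S.getD y []) (S.getD nd []) (P, Q.dropLast) p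
    have hS2 : ∀ p, s2.1.getD p [] =
        if p ∈ s1.1.getD nd [] then PySem.Set.discard (S.getD p []) nd else S.getD p [] :=
      fun p => pvPassFold_getD nd prot (PySem.Set.add R nd) (fun y => s1.1.getD y []) (s1.1.getD nd []) (S, s1.2) p
    have hpCur : ∀ p, p ∉ PySem.Set.add R nd → (p ∈ s1.1.getD nd [] ↔ pvFP kept eo ei R nd p) := by
      intro p hpR'
      have hpnd : p ≠ nd := fun he => hpR' ((hmemR' p).mpr (Or.inr he))
      rw [hP1 nd]
      split
      · rw [PySem.Set.mem_discard]
        constructor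
        · rintro ⟨h1, _⟩
          exact (HI2p nd hnk hnR p).mp h1
        · intro h1
          exact ⟨(HI2p nd hnk hnR p).mpr h1, hpnd⟩
      · exact HI2p nd hnk hnR p
    have HI2p' : ∀ p ∈ kept, p ∉ PySem.Set.add R nd → ∀ s,
        s ∈ s1.1.getD p [] ↔ pvFP kept eo ei (PySem.Set.add R nd) p s := by
      intro p hpk hpR' s
      have hpR : p ∉ R := fun hc => hpR' (hsub' p hc)
      rw [hP1 p]
      by_cases hps : p ∈ S.getD nd []
      · rw [if_pos hps, PySem.Set.mem_discard, hadd,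
          ← pvFP_snoc_mem kept eo ei R nd p hnR (((hsCur p).mp hps).1) s]
        exact and_congr_left' (HI2p p hpk hpR s)
      · rw [if_neg hps]
        have hpo : p ∉ pvOut eo nd := fun hc => hps ((hsCur p).mpr ⟨hc, hpk, Or.inl hpR⟩)
        rw [hadd, ← pvFP_snoc_not_mem kept eo ei R nd p hpo s]
        exact HI2p p hpk hpR s
    have HI2s' : ∀ p ∈ kept, p ∉ PySem.Set.add R nd → ∀ t,
        t ∈ s2.1.getD p [] ↔ pvFS kept eo ei (PySem.Set.add R nd) p t := by
      intro p hpk hpR' t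
      have hpR : p ∉ R := fun hc => hpR' (hsub' p hc)
      rw [hS2 p]
      by_cases hpp : p ∈ s1.1.getD nd []
      · rw [if_pos hpp, PySem.Set.mem_discard, hadd,
          ← pvFS_snoc_mem kept eo ei R nd p hnR (((hpCur p hpR').mp hpp).1) t]
        exact and_congr_left' (HI2s p hpk hpR t)
      · rw [if_neg hpp]
        have hpi : p ∉ pvIn ei nd := fun hc => hpp ((hpCur p hpR').mpr ⟨hc, hpk, Or.inl hpR⟩)
        rw [hadd, ← pvFS_snoc_not_mem kept eo ei R nd p hpi t]
        exact HI2s p hpk hpR t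
    have hnoP : ∀ x, x ∈ kept → x ∉ PySem.Set.add R nd → x ∈ pvOut eo nd →
        PySem.Set.discard (P.getD x []) nd = [] → ∀ s, ¬ pvFP kept eo ei (PySem.Set.add R nd) x s := by
      intro x hxk hxR' hxo hemp s hfp
      have hxR : x ∉ R := fun hc => hxR' (hsub' x hc)
      have hfpR : pvFP kept eo ei R x s := pvFP_mono kept eo ei hsub' hfp
      have hsP : s ∈ P.getD x [] := (HI2p x hxk hxR s).mpr hfpR
      by_cases hsn : s = nd
      · rcases hfp.2.2 with hc | hc
        · exact hc ((hmemR' s).mpr (Or.inr hsn))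
        · exact hc (by rw [hsn]; exact hxo)
      · have hmem : s ∈ PySem.Set.discard (P.getD x []) nd := by
          rw [PySem.Set.mem_discard]
          exact ⟨hsP, hsn⟩
        rw [hemp] at hmem
        exact absurd hmem (List.not_mem_nil)
    have hnoS : ∀ x, x ∈ kept → x ∉ PySem.Set.add R nd → x ∈ pvIn ei nd →
        PySem.Set.discard (S.getD x []) nd = [] → ∀ t, ¬ pvFS kept eo ei (PySem.Set.add R nd) x t := by
      intro x hxk hxR' hxi hemp t hfs
      have hxR : x ∉ R := fun hc => hxR' (hsub' x hc)
      have hfsR : pvFS kept eo ei R x t := pvFS_mono kept eo ei hsub' hfs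
      have htS : t ∈ S.getD x [] := (HI2s x hxk hxR t).mpr hfsR
      by_cases htn : t = nd
      · rcases hfs.2.2 with hc | hc
        · exact hc ((hmemR' t).mpr (Or.inr htn))
        · exact hc (by rw [htn]; exact hxi)
      · have hmem : t ∈ PySem.Set.discard (S.getD x []) nd := by
          rw [PySem.Set.mem_discard]
          exact ⟨htS, htn⟩
        rw [hemp] at hmem
        exact absurd hmem (List.not_mem_nil)
    have hstaleS : ∀ x ∈ kept, x ∉ R → S.getD x [] = [] → ∀ t, ¬ pvFS kept eo ei R x t := by
      intro x hxk hxR hemp t ht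
      have hm := (HI2s x hxk hxR t).mpr ht
      rw [hemp] at hm
      exact absurd hm (List.not_mem_nil)
    have hstaleP : ∀ x ∈ kept, x ∉ R → P.getD x [] = [] → ∀ s, ¬ pvFP kept eo ei R x s := by
      intro x hxk hxR hemp s hsx
      have hm := (HI2p x hxk hxR s).mpr hsx
      rw [hemp] at hm
      exact absurd hm (List.not_mem_nil)
    have HI3' : ∀ x ∈ s2.2, x ∈ prot ∨ x ∈ PySem.Set.add R nd ∨
        pvRem kept eo ei prot (PySem.Set.add R nd) x := by
      intro x hx
      rcases pvPassFold_queue_mem _ _ _ _ _ _ _ hx with hx1 | ⟨hxp, hx1, hx2, hx3⟩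
      · rcases pvPassFold_queue_mem _ _ _ _ _ _ _ hx1 with hx0 | ⟨hxs, hx1', hx2', hx3'⟩
        · rcases HI3 x ((List.dropLast_sublist Q).subset hx0) with hh | hh | hh
          · exact Or.inl hh
          · exact Or.inr (Or.inl (hsub' x hh))
          · exact Or.inr (Or.inr (pvRem_mono kept eo ei prot hsub' hh))
        · have hxk : x ∈ kept := hs nd x hxs
          have hxR : x ∉ R := fun hc => hx2' (hsub' x hc)
          refine Or.inr (Or.inr ⟨hxk, hx1', ?_⟩)
          rcases hx3' with hemp | hemp
          · exact Or.inr (hnoP x hxk hx2' (((hsCur x).mp hxs).1) hemp)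
          · exact Or.inl (fun t ht => hstaleS x hxk hxR hemp t (pvFS_mono kept eo ei hsub' ht))
      · have hfpnd : pvFP kept eo ei R nd x := (hpCur x hx2).mp hxp
        have hxk : x ∈ kept := hfpnd.2.1
        have hxR : x ∉ R := fun hc => hx2 (hsub' x hc)
        refine Or.inr (Or.inr ⟨hxk, hx1, ?_⟩)
        rcases hx3 with hemp | hemp
        · exact Or.inl (hnoS x hxk hx2 hfpnd.1 hemp)
        · rw [hP1 x] at hemp
          by_cases hxs : x ∈ S.getD nd []
          · rw [if_pos hxs] at hemp
            exact Or.inr (hnoP x hxk hx2 (((hsCur x).mp hxs).1) hemp)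
          · rw [if_neg hxs] at hemp
            exact Or.inr (fun s hsx => hstaleP x hxk hxR hemp s (pvFP_mono kept eo ei hsub' hsx))
    have HI4' : ∀ n ∈ kept, n ∉ PySem.Set.add R nd →
        pvRem kept eo ei prot (PySem.Set.add R nd) n → n ∈ s2.2 := by
      intro n hnk2 hnR'2 hrem'
      have hnRn : n ∉ R := fun hc => hnR'2 (hsub' n hc)
      have hnnd : n ≠ nd := fun he => hnR'2 ((hmemR' n).mpr (Or.inr he))
      by_cases hold : pvRem kept eo ei prot R n
      · have hq1 : n ∈ Q := HI4 n hnk2 hnRn hold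
        rw [← List.dropLast_concat_getLast hne'] at hq1
        have hq2 : n ∈ Q.dropLast := by
          rcases List.mem_append.mp hq1 with hh | hh
          · exact hh
          · exact absurd (List.mem_singleton.mp hh) hnnd
        exact pvPassFold_queue_mono _ _ _ _ _ _ _ (pvPassFold_queue_mono _ _ _ _ _ _ _ hq2)
      · have hSL : ∃ t, pvFS kept eo ei R n t := by
          by_contra hc
          exact hold ⟨hnk2, hrem'.2.1, Or.inl (not_exists.mp hc)⟩
        have hPL : ∃ s, pvFP kept eo ei R n s := by
          by_contra hc
          exact hold ⟨hnk2, hrem'.2.1, Or.inr (not_exists.mp hc)⟩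
        rcases hrem'.2.2 with hflip | hflip
        · -- no successors left at R ∪ {nd}: n is in preds(nd), enqueued by the second loop
          obtain ⟨t0, ht0⟩ := hSL
          obtain ⟨m1, m2, m3⟩ := ht0
          have h3 : t0 ∈ PySem.Set.add R nd ∧ n ∈ pvIn ei t0 := by
            by_contra hc
            rw [not_and_or] at hc
            refine hflip t0 ⟨m1, m2, ?_⟩
            rcases hc with hc | hc
            · exact Or.inl hc
            · exact Or.inr hc
          have ht0nd : t0 = nd := by
            rcases m3 with hm | hm
            · rcases (hmemR' t0).mp h3.1 with hh | hh
              · exact absurd hh hm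
              · exact hh
            · exact absurd h3.2 hm
          rw [ht0nd] at h3
          have hnpc : n ∈ s1.1.getD nd [] :=
            (hpCur n hnR'2).mpr ⟨h3.2, hnk2, Or.inl hnRn⟩
          have hempS : PySem.Set.discard (S.getD n []) nd = [] := by
            rw [List.eq_nil_iff_forall_not_mem]
            intro t htm
            rw [PySem.Set.mem_discard] at htm
            have hfs : pvFS kept eo ei R n t := (HI2s n hnk2 hnRn t).mp htm.1
            refine hflip t ⟨hfs.1, hfs.2.1, ?_⟩
            rcases hfs.2.2 with hm | hm
            · left
              intro hc
              rcases (hmemR' t).mp hc with hh | hh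
              · exact hm hh
              · exact htm.2 hh
            · exact Or.inr hm
          exact pvPassFold_enqueued _ _ _ _ n _ _ hnpc hrem'.2.1 hnR'2 (Or.inl hempS)
        · -- no predecessors left at R ∪ {nd}: n is in succs(nd), enqueued by the first loop
          obtain ⟨s0, hs0⟩ := hPL
          obtain ⟨m1, m2, m3⟩ := hs0
          have h3 : s0 ∈ PySem.Set.add R nd ∧ n ∈ pvOut eo s0 := by
            by_contra hc
            rw [not_and_or] at hc
            refine hflip s0 ⟨m1, m2, ?_⟩
            rcases hc with hc | hc
            · exact Or.inl hc
            · exact Or.inr hc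
          have hs0nd : s0 = nd := by
            rcases m3 with hm | hm
            · rcases (hmemR' s0).mp h3.1 with hh | hh
              · exact absurd hh hm
              · exact hh
            · exact absurd h3.2 hm
          rw [hs0nd] at h3
          have hnsc : n ∈ S.getD nd [] := (hsCur n).mpr ⟨h3.2, hnk2, Or.inl hnRn⟩
          have hempP : PySem.Set.discard (P.getD n []) nd = [] := by
            rw [List.eq_nil_iff_forall_not_mem]
            intro s htm
            rw [PySem.Set.mem_discard] at htm
            have hfp : pvFP kept eo ei R n s := (HI2p n hnk2 hnRn s).mp htm.1
            refine hflip s ⟨hfp.1, hfp.2.1, ?_⟩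
            rcases hfp.2.2 with hm | hm
            · left
              intro hc
              rcases (hmemR' s).mp hc with hh | hh
              · exact hm hh
              · exact htm.2 hh
            · exact Or.inr hm
          have hn1 : n ∈ s1.2 :=
            pvPassFold_enqueued _ _ _ _ n _ (P, Q.dropLast) hnsc hrem'.2.1 hnR'2 (Or.inl hempP)
          exact pvPassFold_queue_mono _ _ _ _ _ _ _ hn1
    exact IH HI2s' HI2p' HI3' HI4' HD'

-- ===== B-side lemmas =====
theorem pvDiscardAll_getD (node : String) (l : List String)
    (d : PySem.Dict String (PySem.Set String)) (p : String) :
    (pvDiscardAll node l d).getD p [] =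
      if p ∈ l then PySem.Set.discard (d.getD p []) node else d.getD p [] := by
  unfold pvDiscardAll
  induction l generalizing d with
  | nil => simp
  | cons y l ih =>
    rw [List.foldl_cons, ih]
    by_cases hpl : p ∈ l <;> by_cases hpy : p = y <;>
      simp [hpl, hpy, PySem.Dict.getD_modify, pvDiscard_idem]

theorem pvPrune_snd_getD
    (st : PySem.Dict String (PySem.Set String) × PySem.Dict String (PySem.Set String))
    (dn p : String) :
    (pvPrune st dn).2.getD p [] =
      if p ∈ st.1.getD dn [] then PySem.Set.discard (st.2.getD p []) dn else st.2.getD p [] := by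
  unfold pvPrune
  exact pvDiscardAll_getD dn _ _ p

theorem pvPrune_fst_getD
    (st : PySem.Dict String (PySem.Set String) × PySem.Dict String (PySem.Set String))
    (dn p : String) :
    (pvPrune st dn).1.getD p [] =
      if p ∈ (pvPrune st dn).2.getD dn [] then PySem.Set.discard (st.1.getD p []) dn
      else st.1.getD p [] := by
  unfold pvPrune
  exact pvDiscardAll_getD dn _ _ p

-- pruning one removable node advances the closed-form invariant from R to R ++ [dn]
theorem pvPrune_inv (kept : List String) (eo ei : List (String × List String)) (R : List String)
    (st : PySem.Dict String (PySem.Set String) × PySem.Dict String (PySem.Set String))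
    (dn : String) (hnk : dn ∈ kept) (hnR : dn ∉ R)
    (HI2s : ∀ p ∈ kept, p ∉ R → ∀ t, t ∈ st.1.getD p [] ↔ pvFS kept eo ei R p t)
    (HI2p : ∀ p ∈ kept, p ∉ R → ∀ s, s ∈ st.2.getD p [] ↔ pvFP kept eo ei R p s) :
    (∀ p ∈ kept, p ∉ R ++ [dn] → ∀ t,
        t ∈ (pvPrune st dn).1.getD p [] ↔ pvFS kept eo ei (R ++ [dn]) p t) ∧
    (∀ p ∈ kept, p ∉ R ++ [dn] → ∀ s,
        s ∈ (pvPrune st dn).2.getD p [] ↔ pvFP kept eo ei (R ++ [dn]) p s) := by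
  have hmemR' : ∀ x : String, x ∈ R ++ [dn] ↔ x ∈ R ∨ x = dn := by
    intro x; simp
  have hsub' : ∀ x ∈ R, x ∈ R ++ [dn] := fun x hx => (hmemR' x).mpr (Or.inl hx)
  have hsCur : ∀ t, t ∈ st.1.getD dn [] ↔ pvFS kept eo ei R dn t := HI2s dn hnk hnR
  have hpCur : ∀ p, p ∉ R ++ [dn] →
      (p ∈ (pvPrune st dn).2.getD dn [] ↔ pvFP kept eo ei R dn p) := by
    intro p hpR'
    have hpnd : p ≠ dn := fun he => hpR' ((hmemR' p).mpr (Or.inr he))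
    rw [pvPrune_snd_getD]
    split
    · rw [PySem.Set.mem_discard]
      constructor
      · rintro ⟨h1, _⟩
        exact (HI2p dn hnk hnR p).mp h1
      · intro h1
        exact ⟨(HI2p dn hnk hnR p).mpr h1, hpnd⟩
    · exact HI2p dn hnk hnR p
  constructor
  · intro p hpk hpR' t
    have hpR : p ∉ R := fun hc => hpR' (hsub' p hc)
    rw [pvPrune_fst_getD]
    by_cases hpp : p ∈ (pvPrune st dn).2.getD dn []
    · rw [if_pos hpp, PySem.Set.mem_discard,
        ← pvFS_snoc_mem kept eo ei R dn p hnR (((hpCur p hpR').mp hpp).1) t]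
      exact and_congr_left' (HI2s p hpk hpR t)
    · rw [if_neg hpp]
      have hpi : p ∉ pvIn ei dn := fun hc => hpp ((hpCur p hpR').mpr ⟨hc, hpk, Or.inl hpR⟩)
      rw [← pvFS_snoc_not_mem kept eo ei R dn p hpi t]
      exact HI2s p hpk hpR t
  · intro p hpk hpR' s
    have hpR : p ∉ R := fun hc => hpR' (hsub' p hc)
    rw [pvPrune_snd_getD]
    by_cases hps : p ∈ st.1.getD dn []
    · rw [if_pos hps, PySem.Set.mem_discard,
        ← pvFP_snoc_mem kept eo ei R dn p hnR (((hsCur p).mp hps).1) s]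
      exact and_congr_left' (HI2p p hpk hpR s)
    · rw [if_neg hps]
      have hpo : p ∉ pvOut eo dn := fun hc => hps ((hsCur p).mpr ⟨hc, hpk, Or.inl hpR⟩)
      rw [← pvFP_snoc_not_mem kept eo ei R dn p hpo s]
      exact HI2p p hpk hpR s

-- pruning a whole batch advances the invariant from R to R ++ L
theorem pvPrune_fold_inv (kept : List String) (eo ei : List (String × List String))
    (L : List String) : ∀ (R : List String)
    (st : PySem.Dict String (PySem.Set String) × PySem.Dict String (PySem.Set String)),
    L.Nodup → (∀ x ∈ L, x ∈ kept ∧ x ∉ R) →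
    (∀ p ∈ kept, p ∉ R → ∀ t, t ∈ st.1.getD p [] ↔ pvFS kept eo ei R p t) →
    (∀ p ∈ kept, p ∉ R → ∀ s, s ∈ st.2.getD p [] ↔ pvFP kept eo ei R p s) →
    (∀ p ∈ kept, p ∉ R ++ L → ∀ t,
        t ∈ (L.foldl pvPrune st).1.getD p [] ↔ pvFS kept eo ei (R ++ L) p t) ∧
    (∀ p ∈ kept, p ∉ R ++ L → ∀ s,
        s ∈ (L.foldl pvPrune st).2.getD p [] ↔ pvFP kept eo ei (R ++ L) p s) := by
  induction L with
  | nil =>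
    intro R st _ _ h1 h2
    simpa using ⟨h1, h2⟩
  | cons d L ih =>
    intro R st hnd hsub h1 h2
    have hstep := pvPrune_inv kept eo ei R st d (hsub d List.mem_cons_self).1
      (hsub d List.mem_cons_self).2 h1 h2
    have h := ih (R ++ [d]) (pvPrune st d) (List.Nodup.of_cons hnd)
      (by
        intro x hx
        refine ⟨(hsub x (List.mem_cons_of_mem _ hx)).1, ?_⟩
        rw [List.mem_append, List.mem_singleton]
        push_neg
        exact ⟨(hsub x (List.mem_cons_of_mem _ hx)).2,
          fun he => (List.nodup_cons.mp hnd).1 (he ▸ hx)⟩)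
      hstep.1 hstep.2
    simpa [List.append_assoc] using h

theorem pvLoopB_spec (kept : List String) (eo ei : List (String × List String))
    (prot : List String) (hknd : kept.Nodup) :
    ∀ (N : ℕ) (alive R : List String)
      (S P : PySem.Dict String (PySem.Set String)),
    alive.length ≤ N → pvDeriv kept eo ei prot R →
    alive = kept.filter (fun x => !R.contains x) →
    (∀ p ∈ kept, p ∉ R → ∀ t, t ∈ S.getD p [] ↔ pvFS kept eo ei R p t) →
    (∀ p ∈ kept, p ∉ R → ∀ s, s ∈ P.getD p [] ↔ pvFP kept eo ei R p s) →
    ∃ R', pvDeriv kept eo ei prot R' ∧ pvSat kept eo ei prot R' ∧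
      pvLoopB prot S P alive = kept.filter (fun x => !R'.contains x) := by
  intro N
  induction N with
  | zero =>
    intro alive R S P hlen hR ha _ _
    have halive : alive = [] := List.eq_nil_of_length_eq_zero (Nat.le_zero.mp hlen)
    refine ⟨R, hR, ?_, ?_⟩
    · intro n hrem
      by_cases hn : n ∈ R
      · exact hn
      · have : n ∈ alive := by
          rw [ha, List.mem_filter]
          exact ⟨hrem.1, by simpa using hn⟩
        rw [halive] at this
        exact absurd this (List.not_mem_nil)
    · rw [pvLoopB.eq_def]
      rw [dif_pos (by rw [halive]; rfl)]
      exact ha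
  | succ M ih =>
    intro alive R S P hlen hR ha HI2s HI2p
    -- the drop test of a sweep is exactly removability at R, for surviving nodes
    have hcnd : ∀ n ∈ alive,
        ((!prot.contains n && ((S.getD n []).isEmpty || (P.getD n []).isEmpty)) = true
          ↔ pvRem kept eo ei prot R n) := by
      intro n hna
      have hnk : n ∈ kept := by
        rw [ha, List.mem_filter] at hna; exact hna.1
      have hnR : n ∉ R := by
        rw [ha, List.mem_filter] at hna; simpa using hna.2
      rw [Bool.and_eq_true, Bool.or_eq_true, List.isEmpty_iff, List.isEmpty_iff]
      constructor
      · rintro ⟨hprot, hor⟩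
        refine ⟨hnk, by simpa using hprot, ?_⟩
        rcases hor with hc | hc
        · left
          intro t ht
          have := (HI2s n hnk hnR t).mpr ht
          rw [hc] at this
          exact absurd this (List.not_mem_nil)
        · right
          intro s hs_
          have := (HI2p n hnk hnR s).mpr hs_
          rw [hc] at this
          exact absurd this (List.not_mem_nil)
      · rintro ⟨_, hprot, hor⟩
        refine ⟨by simpa using hprot, ?_⟩
        rcases hor with hc | hc
        · left
          rw [List.eq_nil_iff_forall_not_mem]
          intro t ht
          exact hc t ((HI2s n hnk hnR t).mp ht)
        · right
          rw [List.eq_nil_iff_forall_not_mem]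
          intro s hs_
          exact hc s ((HI2p n hnk hnR s).mp hs_)
    by_cases hd : (alive.filter
        (fun n => !prot.contains n && ((S.getD n []).isEmpty || (P.getD n []).isEmpty))).isEmpty
    · rw [pvLoopB.eq_def, dif_pos hd]
      refine ⟨R, hR, ?_, ha⟩
      intro n hrem
      by_cases hn : n ∈ R
      · exact hn
      · exfalso
        have hna : n ∈ alive := by
          rw [ha, List.mem_filter]
          exact ⟨hrem.1, by simpa using hn⟩
        have : n ∈ alive.filter
            (fun n => !prot.contains n && ((S.getD n []).isEmpty || (P.getD n []).isEmpty)) :=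
          List.mem_filter.mpr ⟨hna, (hcnd n hna).mpr hrem⟩
        rw [List.isEmpty_iff.mp hd] at this
        exact absurd this (List.not_mem_nil)
    · rw [pvLoopB.eq_def, dif_neg hd]
      set drop := alive.filter
        (fun n => !prot.contains n && ((S.getD n []).isEmpty || (P.getD n []).isEmpty)) with hdrop
      have haliveNd : alive.Nodup := by
        rw [ha]; exact List.Nodup.filter _ hknd
      have hdropNd : drop.Nodup := List.Nodup.filter _ haliveNd
      have hdropRem : ∀ x ∈ drop, pvRem kept eo ei prot R x := by
        intro x hx
        rw [hdrop, List.mem_filter] at hx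
        exact (hcnd x hx.1).mp hx.2
      have hdropK : ∀ x ∈ drop, x ∈ kept ∧ x ∉ R := by
        intro x hx
        have hxa : x ∈ alive := (List.mem_filter.mp hx).1
        rw [ha, List.mem_filter] at hxa
        exact ⟨hxa.1, by simpa using hxa.2⟩
      have hD1 : pvDeriv kept eo ei prot (R ++ drop) :=
        pvDeriv_append kept eo ei prot drop R hR hdropNd (fun x hx => (hdropK x hx).2) hdropRem
      have hinv := pvPrune_fold_inv kept eo ei drop R (S, P) hdropNd hdropK HI2s HI2p
      have ha' : PySem.Set.diff alive drop = kept.filter (fun x => !(R ++ drop).contains x) := by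
        unfold PySem.Set.diff
        rw [ha, List.filter_filter]
        apply List.filter_congr
        intro a _
        rw [Bool.eq_iff_iff]
        by_cases h1 : a ∈ R <;> by_cases h2 : a ∈ drop <;>
          simp [h1, h2, PySem.Set.contains_iff]
      have hlt : (PySem.Set.diff alive drop).length < alive.length := by
        have hne : drop ≠ [] := by
          simpa [List.isEmpty_iff] using hd
        obtain ⟨x, hx⟩ := List.exists_mem_of_ne_nil _ hne
        unfold PySem.Set.diff
        rw [List.length_filter_lt_length_iff_exists]
        refine ⟨x, (List.mem_filter.mp hx).1, ?_⟩
        simp only [Bool.not_eq_true', Bool.not_eq_false]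
        rw [PySem.Set.contains_iff]
        exact hx
      obtain ⟨R', hD', hSat', hEq'⟩ := ih (PySem.Set.diff alive drop) (R ++ drop)
        ((drop.foldl pvPrune (S, P)).1) ((drop.foldl pvPrune (S, P)).2)
        (by omega) hD1 ha' hinv.1 hinv.2
      exact ⟨R', hD', hSat', hEq'⟩

-- ===== VERDICT (by name: the statement is the Claim_ definition above) =====
theorem strip_leaves_py_spec : Claim_equal_strip_leaves_py := by
  unfold Claim_equal_strip_leaves_py
  intro kept eo ei prot _ hpre
  unfold Pre_strip_leaves_py at hpre
  unfold Spec_strip_leaves_py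
  -- the initial adjacency dicts satisfy the invariants at removed = []
  have HI2s0 : ∀ p ∈ kept, p ∉ ([] : List String) → ∀ t,
      t ∈ (pvAdj kept eo).getD p [] ↔ pvFS kept eo ei [] p t := by
    intro p hpk _ t
    rw [pvAdj_getD, if_pos hpk, PySem.Set.mem_ofList, List.mem_filter]
    unfold pvFS pvOut
    constructor
    · rintro ⟨h1, h2⟩
      exact ⟨h1, by simpa using h2, Or.inl (by simp)⟩
    · rintro ⟨h1, h2, _⟩
      exact ⟨h1, by simpa using h2⟩
  have HI2p0 : ∀ p ∈ kept, p ∉ ([] : List String) → ∀ s,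
      s ∈ (pvAdj kept ei).getD p [] ↔ pvFP kept eo ei [] p s := by
    intro p hpk _ s
    rw [pvAdj_getD, if_pos hpk, PySem.Set.mem_ofList, List.mem_filter]
    unfold pvFP pvIn
    constructor
    · rintro ⟨h1, h2⟩
      exact ⟨h1, by simpa using h2, Or.inl (by simp)⟩
    · rintro ⟨h1, h2, _⟩
      exact ⟨h1, by simpa using h2⟩
  have hcnd : ∀ n ∈ kept,
      ((!prot.contains n && (((pvAdj kept eo).getD n []).isEmpty || ((pvAdj kept ei).getD n []).isEmpty)) = true
        ↔ (n ∉ prot ∧ ((∀ t, ¬ pvFS kept eo ei [] n t) ∨ (∀ s, ¬ pvFP kept eo ei [] n s)))) := by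
    intro n hnk
    rw [Bool.and_eq_true, Bool.or_eq_true, List.isEmpty_iff, List.isEmpty_iff]
    constructor
    · rintro ⟨hprot, hor⟩
      refine ⟨by simpa using hprot, ?_⟩
      rcases hor with hc | hc
      · left
        intro t ht
        have := (HI2s0 n hnk (by simp) t).mpr ht
        rw [hc] at this
        exact absurd this (List.not_mem_nil)
      · right
        intro s hs_
        have := (HI2p0 n hnk (by simp) s).mpr hs_
        rw [hc] at this
        exact absurd this (List.not_mem_nil)
    · rintro ⟨hprot, hor⟩
      refine ⟨by simpa using hprot, ?_⟩
      rcases hor with hc | hc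
      · left
        rw [List.eq_nil_iff_forall_not_mem]
        intro t ht
        exact hc t ((HI2s0 n hnk (by simp) t).mp ht)
      · right
        rw [List.eq_nil_iff_forall_not_mem]
        intro s hs_
        exact hc s ((HI2p0 n hnk (by simp) s).mp hs_)
  obtain ⟨RA, hDA, hSatA, hEqA⟩ := pvLoopA_spec kept eo ei prot
    (pvAdj kept eo) (pvAdj kept ei) []
    (kept.filter (fun n => !prot.contains n &&
      (((pvAdj kept eo).getD n []).isEmpty || ((pvAdj kept ei).getD n []).isEmpty)))
    (fun x hx => (List.mem_filter.mp hx).1)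
    ⟨List.nodup_nil, by simp⟩
    (fun k t ht => pvAdj_sub kept eo k t ht)
    (fun k t ht => pvAdj_sub kept ei k t ht)
    HI2s0 HI2p0
    (by
      intro x hx
      rw [List.mem_filter] at hx
      have := (hcnd x hx.1).mp hx.2
      exact Or.inr (Or.inr ⟨hx.1, this.1, this.2⟩))
    (by
      intro n hnk _ hrem
      rw [List.mem_filter]
      exact ⟨hnk, (hcnd n hnk).mpr ⟨hrem.2.1, hrem.2.2⟩⟩)
    pvDeriv.nil
  obtain ⟨RB, hDB, hSatB, hEqB⟩ := pvLoopB_spec kept eo ei prot hpre kept.length kept []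
    (pvAdj kept eo) (pvAdj kept ei) le_rfl pvDeriv.nil (by simp) HI2s0 HI2p0
  have hmemAB : ∀ x, x ∈ RA ↔ x ∈ RB :=
    fun x => ⟨fun hxx => pvDeriv_sub_of_sat kept eo ei prot hDA hSatB x hxx,
              fun hxx => pvDeriv_sub_of_sat kept eo ei prot hDB hSatA x hxx⟩
  have hA : strip_leaves_py kept eo ei prot = PySem.Set.diff kept RA := hEqA
  have hBalt : strip_leaves_py_alt kept eo ei prot = pvLoopB prot (pvAdj kept eo) (pvAdj kept ei) kept := by
    unfold strip_leaves_py_alt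
    have h0 : PySem.Set.ofList kept = kept := PySem.Set.ofList_eq_self_of_nodup kept hpre
    rw [h0]
  rw [hA, hBalt, hEqB]
  unfold PySem.Set.diff
  apply List.filter_congr
  intro a _
  have h := hmemAB a
  by_cases haa : a ∈ RA
  · have hbb : a ∈ RB := h.mp haa
    simp [haa, hbb]
  · have hbb : a ∉ RB := fun hc => haa (h.mpr hc)
    simp [haa, hbb]
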